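-- pv_equiv track=rewrite | github.com/MoriartyPuth/Sila-Entropy | Sila Entropy/sila_models.py | _has_digit_sequence
-- ===== SOURCE A (Python) =====
-- def _has_digit_sequence(password, min_len=4):
--     digits = "".join(c for c in password if c.isdigit())
--     if len(digits) < min_len:
--         return False
--     for i in range(len(digits) - min_len + 1):
--         chunk = digits[i : i + min_len]
--         asc = "".join(str((int(chunk[0]) + j) % 10) for j in range(min_len))
--         desc = "".join(str((int(chunk[0]) - j) % 10) for j in range(min_len))
--         if chunk == asc or chunk == desc:
--             return True
--     return False
-- ===== SOURCE B (Python) =====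
-- def _has_digit_sequence(password, min_len=4):
--     digits = [int(c) for c in password if c.isdigit()]
--     if min_len <= 1:
--         return len(digits) >= min_len
--     if len(digits) < min_len:
--         return False
--     asc = desc = 1
--     for a, b in zip(digits, digits[1:]):
--         asc = asc + 1 if (b - a) % 10 == 1 else 1
--         desc = desc + 1 if (a - b) % 10 == 1 else 1
--         if asc >= min_len or desc >= min_len:
--             return True
--     return False
-- ===== Notes on version B (the rewrite author's own statement) =====
-- stated objective: alternative
-- what changed: A rebuilds the expected ascending and descending pattern strings for every window of length min_len and compares; B makes one pass over consecutive digit pairs maintaining two mod-10 run counters and returns True as soon as either run reaches min_len, with the min_len<=1 cases handled up front.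
import Mathlib
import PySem

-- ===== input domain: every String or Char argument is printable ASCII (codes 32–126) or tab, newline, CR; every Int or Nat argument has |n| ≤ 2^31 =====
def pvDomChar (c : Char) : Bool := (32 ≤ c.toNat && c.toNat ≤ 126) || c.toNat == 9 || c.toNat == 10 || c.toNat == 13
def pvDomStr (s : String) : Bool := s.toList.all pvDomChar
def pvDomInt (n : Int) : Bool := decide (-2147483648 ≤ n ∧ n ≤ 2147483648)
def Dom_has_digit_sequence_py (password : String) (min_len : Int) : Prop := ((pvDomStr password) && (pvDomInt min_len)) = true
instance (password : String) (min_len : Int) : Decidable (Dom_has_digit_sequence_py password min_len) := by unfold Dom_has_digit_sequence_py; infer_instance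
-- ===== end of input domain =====

-- B replaces A's per-window rebuild of ascending/descending pattern strings by one pass over
-- consecutive digit pairs with two run counters (objective: alternative algorithm).

-- ===== PORT A =====
-- the loop body of A's `for i in range(...)`: chunk == asc or chunk == desc at window i
def aChunkHit (digits : List Char) (min_len : Int) (i : Int) : Bool :=
  let chunk : List Char := PySem.List.slice digits (some i) (some (i + min_len))
  -- int(chunk[0]) sits inside the generator expression, re-evaluated per j and only
  -- when range(min_len) ≠ []; there chunk is a nonempty list of digit chars, so the
  -- `.getD` defaults are unreachable
  let asc : List Char := PySem.Chars.join []
    ((PySem.List.pyRange 0 min_len 1).map (fun j =>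
      PySem.Int.toChars (PySem.Int.mod ((PySem.Int.ofChars? [(PySem.List.pyGet? chunk 0).getD ' ']).getD 0 + j) 10)))
  let desc : List Char := PySem.Chars.join []
    ((PySem.List.pyRange 0 min_len 1).map (fun j =>
      PySem.Int.toChars (PySem.Int.mod ((PySem.Int.ofChars? [(PySem.List.pyGet? chunk 0).getD ' ']).getD 0 - j) 10)))
  chunk == asc || chunk == desc

-- `for i in range(0, stop)` with early `return True`, as an index recursion (Python's
-- range is lazy, so the loop is rendered without materializing the range)
def aLoop (digits : List Char) (min_len : Int) (i stop : Int) : Bool :=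
  if h : i < stop then
    if aChunkHit digits min_len i then true
    else aLoop digits min_len (i + 1) stop
  else false
termination_by (stop - i).toNat
decreasing_by omega

def has_digit_sequence_py (password : String) (min_len : Int) : Bool :=
  let digits : List Char := password.toList.filter (fun c => PySem.Chars.isdigit c)
  if (digits.length : Int) < min_len then
    false
  else
    aLoop digits min_len 0 ((digits.length : Int) - min_len + 1)

-- ===== PORT B =====
-- the `for a, b in zip(digits, digits[1:])` loop with early `return True`
def altRun (min_len : Int) : List Int → Int → Int → Bool
  | [], _, _ => false
  | [_], _, _ => false
  | a :: b :: rest, asc, desc =>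
    let asc' := if PySem.Int.mod (b - a) 10 == 1 then asc + 1 else 1
    let desc' := if PySem.Int.mod (a - b) 10 == 1 then desc + 1 else 1
    if min_len ≤ asc' || min_len ≤ desc' then true
    else altRun min_len (b :: rest) asc' desc'

def has_digit_sequence_py_alt (password : String) (min_len : Int) : Bool :=
  let digits : List Int := (password.toList.filter (fun c => PySem.Chars.isdigit c)).map
      (fun c => (PySem.Int.ofChars? [c]).getD 0)
  if min_len ≤ 1 then decide (min_len ≤ (digits.length : Int))
  else if (digits.length : Int) < min_len then false
  else altRun min_len digits 1 1

-- ===== PRECONDITION & SPEC =====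
def Spec_has_digit_sequence_py (password : String) (min_len : Int) (out : Bool) : Prop := out = has_digit_sequence_py_alt password min_len
instance (password : String) (min_len : Int) (out : Bool) : Decidable (Spec_has_digit_sequence_py password min_len out) := by unfold Spec_has_digit_sequence_py; infer_instance

-- ===== CLAIM (what is proved, stated in full; the proofs are below) =====
def Claim_equal_has_digit_sequence_py : Prop := ∀ (password : String) (min_len : Int), Dom_has_digit_sequence_py password min_len → Spec_has_digit_sequence_py password min_len (has_digit_sequence_py password min_len)

-- ===== LEMMAS AND PROOFS =====

lemma aLoop_eq_any (digits : List Char) (min_len : Int) : ∀ (i stop : Int),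
    aLoop digits min_len i stop = (PySem.List.pyRange i stop 1).any (fun k => aChunkHit digits min_len k)
  | i, stop => by
    rw [aLoop]
    by_cases h : i < stop
    · rw [PySem.List.pyRange_one_cons h]
      rw [dif_pos h]
      rw [List.any_cons]
      by_cases hb : aChunkHit digits min_len i
      · simp [hb]
      · simp only [hb, Bool.false_or]
        exact aLoop_eq_any digits min_len (i + 1) stop
    · rw [dif_neg h]
      rw [show PySem.List.pyRange i stop 1 = [] from by
        simp [PySem.List.pyRange]
        omega]
      rfl
termination_by i stop => (stop - i).toNat
decreasing_by omega

/-- the digit value of a digit character -/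
def dval (c : Char) : Int := (c.toNat : Int) - 48

lemma char_eq_of_toNat_eq (c d : Char) (h : c.val.toNat = d.val.toNat) : c = d :=
  Char.ext (UInt32.toNat_inj.mp h)

lemma digit_cases (c : Char) (h : PySem.Chars.isdigit c = true) :
    c = '0' ∨ c = '1' ∨ c = '2' ∨ c = '3' ∨ c = '4' ∨ c = '5' ∨ c = '6' ∨ c = '7' ∨ c = '8' ∨ c = '9' := by
  simp [PySem.Chars.isdigit] at h
  obtain ⟨h1, h2⟩ := h
  have h1' : 48 ≤ c.val.toNat := by exact_mod_cast h1
  have h2' : c.val.toNat ≤ 57 := by exact_mod_cast h2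
  set n := c.val.toNat with hn
  interval_cases n <;>
    [exact Or.inl (char_eq_of_toNat_eq _ _ hn.symm);
     exact Or.inr (Or.inl (char_eq_of_toNat_eq _ _ hn.symm));
     exact Or.inr (Or.inr (Or.inl (char_eq_of_toNat_eq _ _ hn.symm)));
     exact Or.inr (Or.inr (Or.inr (Or.inl (char_eq_of_toNat_eq _ _ hn.symm))));
     exact Or.inr (Or.inr (Or.inr (Or.inr (Or.inl (char_eq_of_toNat_eq _ _ hn.symm)))));
     exact Or.inr (Or.inr (Or.inr (Or.inr (Or.inr (Or.inl (char_eq_of_toNat_eq _ _ hn.symm))))));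
     exact Or.inr (Or.inr (Or.inr (Or.inr (Or.inr (Or.inr (Or.inl (char_eq_of_toNat_eq _ _ hn.symm)))))));
     exact Or.inr (Or.inr (Or.inr (Or.inr (Or.inr (Or.inr (Or.inr (Or.inl (char_eq_of_toNat_eq _ _ hn.symm))))))));
     exact Or.inr (Or.inr (Or.inr (Or.inr (Or.inr (Or.inr (Or.inr (Or.inr (Or.inl (char_eq_of_toNat_eq _ _ hn.symm)))))))));
     exact Or.inr (Or.inr (Or.inr (Or.inr (Or.inr (Or.inr (Or.inr (Or.inr (Or.inr (char_eq_of_toNat_eq _ _ hn.symm)))))))))]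

lemma ofChars_digit (c : Char) (h : PySem.Chars.isdigit c = true) :
    (PySem.Int.ofChars? [c]).getD 0 = dval c := by
  rcases digit_cases c h with h|h|h|h|h|h|h|h|h|h <;> subst h <;> decide

lemma toChars_dval (c : Char) (h : PySem.Chars.isdigit c = true) :
    PySem.Int.toChars (dval c) = [c] := by
  rcases digit_cases c h with h|h|h|h|h|h|h|h|h|h <;> subst h <;> decide

lemma dval_bounds (c : Char) (h : PySem.Chars.isdigit c = true) :
    0 ≤ dval c ∧ dval c < 10 := by
  rcases digit_cases c h with h|h|h|h|h|h|h|h|h|h <;> subst h <;> decide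

lemma toChars_of_small (v : Int) (h0 : 0 ≤ v) (h10 : v < 10) :
    PySem.Int.toChars v = [Char.ofNat (48 + v.toNat)] ∧
    PySem.Chars.isdigit (Char.ofNat (48 + v.toNat)) = true ∧
    dval (Char.ofNat (48 + v.toNat)) = v := by
  interval_cases v <;> exact ⟨by decide, by decide, by decide⟩

/-- a block of `n` consecutive `true`s starting at `i` -/
def blockAt (bs : List Bool) (i n : Nat) : Prop :=
  i + n ≤ bs.length ∧ ∀ j < n, bs.getD (i + j) false = true

/-- single run counter over a step list, succeeding when it reaches `m` -/
def reachB (m : Int) : List Bool → Int → Bool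
  | [], _ => false
  | s :: rest, c =>
    let c' := if s then c + 1 else 1
    if m ≤ c' then true else reachB m rest c'

def ascR (a b : Int) : Bool := PySem.Int.mod (b - a) 10 == 1
def descR (a b : Int) : Bool := PySem.Int.mod (a - b) 10 == 1

/-- the adjacent-pair step list -/
def stepsOf (r : Int → Int → Bool) : List Int → List Bool
  | [] => []
  | [_] => []
  | a :: b :: rest => r a b :: stepsOf r (b :: rest)

lemma stepsOf_length (r : Int → Int → Bool) : ∀ l : List Int, (stepsOf r l).length = l.length - 1
  | [] => rfl
  | [_] => rfl
  | a :: b :: rest => by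
    simp only [stepsOf, List.length_cons]
    rw [stepsOf_length r (b :: rest)]
    simp

lemma stepsOf_getD (r : Int → Int → Bool) :
    ∀ (l : List Int) (k : Nat), k + 1 < l.length →
      (stepsOf r l).getD k false = r (l.getD k 0) (l.getD (k + 1) 0)
  | [], k, h => by simp at h
  | [_], k, h => by simp at h
  | a :: b :: rest, 0, h => by simp [stepsOf]
  | a :: b :: rest, (k+1), h => by
    simp only [stepsOf, List.getD_cons_succ]
    exact stepsOf_getD r (b :: rest) k (by simpa using Nat.lt_of_succ_lt_succ h)

lemma altRun_eq (m : Int) : ∀ (l : List Int) (asc desc : Int),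
    altRun m l asc desc = (reachB m (stepsOf ascR l) asc || reachB m (stepsOf descR l) desc)
  | [], asc, desc => rfl
  | [_], asc, desc => rfl
  | a :: b :: rest, asc, desc => by
    simp only [altRun, stepsOf, reachB, ascR, descR]
    simp [altRun_eq m (b :: rest)]
    ac_rfl

lemma reachB_iff (m : Int) : ∀ (bs : List Bool) (c : Int), 1 ≤ c → c < m →
    (reachB m bs c = true ↔
      (∃ n : Nat, m ≤ c + n ∧ blockAt bs 0 n) ∨ ∃ i n : Nat, 1 ≤ i ∧ m ≤ 1 + n ∧ blockAt bs i n)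
  | [], c, h1, h2 => by
    simp only [reachB, blockAt]
    constructor
    · intro h; exact absurd h (by simp)
    · rintro (⟨n, hmn, hlen, _⟩ | ⟨i, n, hi, hmn, hlen, _⟩) <;> simp only [List.length_nil] at hlen <;> omega
  | s :: rest, c, h1, h2 => by
    cases s with
    | true =>
      simp only [reachB, if_true]
      by_cases hm : m ≤ c + 1
      · rw [if_pos hm]
        constructor
        · intro _
          exact Or.inl ⟨1, by omega, by simp, by intro j hj; interval_cases j; simp⟩
        · intro _; rfl
      · rw [if_neg hm]
        rw [reachB_iff m rest (c+1) (by omega) (by omega)]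
        constructor
        · rintro (⟨n, hmn, hlen, hblk⟩ | ⟨i, n, hi, hmn, hlen, hblk⟩)
          · exact Or.inl ⟨n + 1, by omega, by simp only [List.length_cons] at hlen ⊢; omega, by
              intro j hj
              cases j with
              | zero => simp
              | succ j' => simpa using hblk j' (by omega)⟩
          · exact Or.inr ⟨i + 1, n, by omega, hmn, by simp only [List.length_cons] at hlen ⊢; omega, by
              intro j hj
              simpa [Nat.add_right_comm] using hblk j hj⟩
        · rintro (⟨n, hmn, hlen, hblk⟩ | ⟨i, n, hi, hmn, hlen, hblk⟩)
          · cases n with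
            | zero => omega
            | succ n' =>
              exact Or.inl ⟨n', by omega, by simp only [List.length_cons] at hlen ⊢; omega, by
                intro j hj
                simpa using hblk (j + 1) (by omega)⟩
          · cases i with
            | zero => omega
            | succ i' =>
              cases i' with
              | zero =>
                exact Or.inl ⟨n, by omega, by simp only [List.length_cons] at hlen ⊢; omega, by
                  intro j hj; simpa [Nat.add_comm] using hblk j hj⟩
              | succ i'' =>
                exact Or.inr ⟨i'' + 1, n, by omega, hmn, by simp only [List.length_cons] at hlen ⊢; omega, by
                  intro j hj
                  have := hblk j hj
                  simpa [Nat.add_right_comm] using this⟩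
    | false =>
      simp only [reachB, Bool.false_eq_true, if_false]
      have hm : ¬ m ≤ 1 := by omega
      rw [if_neg hm]
      rw [reachB_iff m rest 1 (by omega) (by omega)]
      constructor
      · rintro (⟨n, hmn, hlen, hblk⟩ | ⟨i, n, hi, hmn, hlen, hblk⟩)
        · exact Or.inr ⟨1, n, by omega, by omega, by simp only [List.length_cons] at hlen ⊢; omega, by
            intro j hj; simpa [Nat.add_comm] using hblk j hj⟩
        · exact Or.inr ⟨i + 1, n, by omega, hmn, by simp only [List.length_cons] at hlen ⊢; omega, by
            intro j hj; simpa [Nat.add_right_comm] using hblk j hj⟩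
      · rintro (⟨n, hmn, hlen, hblk⟩ | ⟨i, n, hi, hmn, hlen, hblk⟩)
        · cases n with
          | zero => omega
          | succ n' =>
            have := hblk 0 (by omega)
            simp at this
        · cases i with
          | zero => omega
          | succ i' =>
            cases i' with
            | zero =>
              exact Or.inl ⟨n, by omega, by simp only [List.length_cons] at hlen ⊢; omega, by
                intro j hj; simpa [Nat.add_comm] using hblk j hj⟩
            | succ i'' =>
              exact Or.inr ⟨i'' + 1, n, by omega, hmn, by simp only [List.length_cons] at hlen ⊢; omega, by
                intro j hj; simpa [Nat.add_right_comm] using hblk j hj⟩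

lemma blockAt_mono (bs : List Bool) (i n n' : Nat) (h : blockAt bs i n) (hle : n' ≤ n) :
    blockAt bs i n' := by
  exact ⟨by have := h.1; omega, fun j hj => h.2 j (by omega)⟩

lemma reachB_one_iff (m : Int) (hm : 2 ≤ m) (bs : List Bool) :
    (reachB m bs 1 = true ↔ ∃ i : Nat, blockAt bs i (m.toNat - 1)) := by
  rw [reachB_iff m bs 1 (le_refl 1) (by omega)]
  constructor
  · rintro (⟨n, hmn, hblk⟩ | ⟨i, n, _, hmn, hblk⟩)
    · exact ⟨0, blockAt_mono _ _ _ _ hblk (by omega)⟩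
    · exact ⟨i, blockAt_mono _ _ _ _ hblk (by omega)⟩
  · rintro ⟨i, hblk⟩
    cases i with
    | zero => exact Or.inl ⟨m.toNat - 1, by omega, hblk⟩
    | succ i' => exact Or.inr ⟨i' + 1, m.toNat - 1, by omega, by omega, hblk⟩

lemma pattern_chars (m : Int) (hm : 0 ≤ m) (g : Int → Int) :
    PySem.Chars.join [] ((PySem.List.pyRange 0 m 1).map (fun j => PySem.Int.toChars (PySem.Int.mod (g j) 10)))
      = (List.range m.toNat).map (fun (k : Nat) => Char.ofNat (48 + (PySem.Int.mod (g (k : Int)) 10).toNat)) := by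
  have hcast : m = ((m.toNat : Nat) : Int) := by omega
  rw [hcast, PySem.List.pyRange_zero_natCast, List.map_map]
  simp only [Int.toNat_natCast]
  have : ((fun j => PySem.Int.toChars (PySem.Int.mod (g j) 10)) ∘ (fun k : Nat => (k : Int)))
      = (fun c => [c]) ∘ (fun (k : Nat) => Char.ofNat (48 + (PySem.Int.mod (g (k : Int)) 10).toNat)) := by
    funext k
    exact (toChars_of_small _ (PySem.Int.mod_nonneg _ (by norm_num)) (PySem.Int.mod_lt _ (by norm_num))).1
  rw [this, ← List.map_map, PySem.Chars.join_nil_singletons]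

lemma chunk_eq_pattern_iff (chunk : List Char) (m : Int) (g : Int → Int)
    (hlen : chunk.length = m.toNat)
    (hdig : ∀ c ∈ chunk, PySem.Chars.isdigit c = true) :
    (chunk = (List.range m.toNat).map (fun (k : Nat) => Char.ofNat (48 + (PySem.Int.mod (g (k : Int)) 10).toNat)))
      ↔ ∀ j : Nat, j < m.toNat → dval (chunk.getD j ' ') = PySem.Int.mod (g (j : Int)) 10 := by
  constructor
  · intro he j hj
    rw [List.getD_eq_getElem chunk ' ' (by omega)]
    have : chunk[j]'(by omega) = Char.ofNat (48 + (PySem.Int.mod (g (j : Int)) 10).toNat) := by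
      have hj2 : j < ((List.range m.toNat).map (fun (k : Nat) => Char.ofNat (48 + (PySem.Int.mod (g (k : Int)) 10).toNat))).length := by
        simp [hj]
      rw [List.getElem_of_eq he]
      simp
    rw [this]
    exact (toChars_of_small _ (PySem.Int.mod_nonneg _ (by norm_num)) (PySem.Int.mod_lt _ (by norm_num))).2.2
  · intro hv
    apply List.ext_getElem (by simp [hlen])
    intro j hj hj2
    have hjm : j < m.toNat := by omega
    have hd : PySem.Chars.isdigit (chunk[j]'hj) = true := hdig _ (List.getElem_mem _)
    have h1 : PySem.Int.toChars (dval (chunk[j]'hj)) = [chunk[j]'hj] := toChars_dval _ hd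
    have hveq : dval (chunk[j]'hj) = PySem.Int.mod (g (j:Int)) 10 := by
      have := hv j hjm
      rwa [List.getD_eq_getElem chunk ' ' (by omega)] at this
    rw [hveq, (toChars_of_small (PySem.Int.mod (g (j:Int)) 10) (PySem.Int.mod_nonneg _ (by norm_num)) (PySem.Int.mod_lt _ (by norm_num))).1] at h1
    simp only [List.getElem_map, List.getElem_range]
    exact (List.cons.injEq _ _ _ _ ▸ h1).1.symm

lemma getD_drop_take {α : Type} (l : List α) (a t j : Nat) (d : α)
    (hj : j < t) (hb : a + t ≤ l.length) :
    ((l.drop a).take t).getD j d = l.getD (a + j) d := by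
  rw [List.getD_eq_getElem _ d (by simp; omega), List.getD_eq_getElem _ d (by omega)]
  simp [List.getElem_take, List.getElem_drop]

-- window pattern ⟺ consecutive chain, on a list of values in [0,10)
lemma win_iff_chain (ds : List Int) (hb : ∀ v ∈ ds, 0 ≤ v ∧ v < 10)
    (a n : Nat) (ha : a + n ≤ ds.length) (hn : 1 ≤ n) (s : Int) (hs : s = 1 ∨ s = -1) :
    (∀ j : Nat, j < n → ds.getD (a + j) 0 = PySem.Int.mod (ds.getD a 0 + s * j) 10)
    ↔ (∀ j : Nat, j + 1 < n → ds.getD (a + j + 1) 0 = PySem.Int.mod (ds.getD (a + j) 0 + s) 10) := by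
  have bound : ∀ k : Nat, k < ds.length → 0 ≤ ds.getD k 0 ∧ ds.getD k 0 < 10 := by
    intro k hk
    rw [List.getD_eq_getElem _ 0 hk]
    exact hb _ (List.getElem_mem _)
  constructor
  · intro H j hj
    have e1 := H j (by omega)
    have e2 := H (j + 1) (by omega)
    rw [PySem.Int.mod_eq_emod_of_pos (by norm_num)] at e1 e2 ⊢
    rw [show a + (j + 1) = a + j + 1 from by omega] at e2
    push_cast at e1 e2 ⊢
    rcases hs with h | h <;> subst h <;> omega
  · intro H j hj
    induction j with
    | zero =>
      have := bound a (by omega)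
      rw [PySem.Int.mod_eq_emod_of_pos (by norm_num)]
      simp only [Nat.cast_zero, mul_zero, add_zero]
      omega
    | succ j' ih =>
      have e1 := ih (by omega)
      have e2 := H j' (by omega)
      have b1 := bound (a + j') (by omega)
      have b2 := bound (a + j' + 1) (by omega)
      have b0 := bound a (by omega)
      rw [PySem.Int.mod_eq_emod_of_pos (by norm_num)] at e1 e2 ⊢
      rw [show a + (j' + 1) = a + j' + 1 from by omega]
      push_cast at e1 e2 ⊢
      rcases hs with h | h <;> subst h <;> omega

-- a single B step test, on bounded values
lemma step_iff (x y : Int) (_hx : 0 ≤ x ∧ x < 10) (hy : 0 ≤ y ∧ y < 10) (s : Int) (hs : s = 1 ∨ s = -1) :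
    ((PySem.Int.mod (s * (y - x)) 10 == 1) = true) ↔ y = PySem.Int.mod (x + s) 10 := by
  rw [beq_iff_eq, PySem.Int.mod_eq_emod_of_pos (by norm_num), PySem.Int.mod_eq_emod_of_pos (by norm_num)]
  rcases hs with h | h <;> subst h <;> constructor <;> intro h' <;> omega


lemma getD_map_dval (cs : List Char) (k : Nat) (hk : k < cs.length) :
    (cs.map dval).getD k 0 = dval (cs.getD k ' ') := by
  rw [List.getD_eq_getElem _ 0 (by simp [hk]), List.getD_eq_getElem _ ' ' hk, List.getElem_map]

lemma chunk_facts (cs : List Char) (m : Int) (hm1 : 1 ≤ m) (a : Nat)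
    (haL : a + m.toNat ≤ cs.length) :
    PySem.List.slice cs (some ((a : Int))) (some ((a : Int) + m)) = List.take m.toNat (List.drop a cs) ∧
    (List.take m.toNat (List.drop a cs)).length = m.toNat := by
  constructor
  · rw [show (a : Int) + m = ((a + m.toNat : Nat) : Int) from by push_cast; omega]
    rw [PySem.List.slice_natCast]
    congr 1
    omega
  · simp only [List.length_take, List.length_drop]
    omega

lemma pyGet0_getD (chunk : List Char) (hne : 0 < chunk.length) :
    (PySem.List.pyGet? chunk 0).getD ' ' = chunk.getD 0 ' ' := by
  rw [show (0 : Int) = ((0 : Nat) : Int) from rfl, PySem.List.pyGet?_natCast]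
  rw [List.getElem?_eq_getElem hne, List.getD_eq_getElem _ _ hne]
  rfl

lemma ascpat_iff (cs : List Char) (hdigcs : ∀ c ∈ cs, PySem.Chars.isdigit c = true)
    (m : Int) (hm2 : 2 ≤ m) (a : Nat) (haL : a + m.toNat ≤ cs.length) :
    ((PySem.List.slice cs (some ((a : Int))) (some ((a : Int) + m)) ==
        PySem.Chars.join [] ((PySem.List.pyRange 0 m 1).map (fun j =>
          PySem.Int.toChars (PySem.Int.mod ((PySem.Int.ofChars? [(PySem.List.pyGet? (PySem.List.slice cs (some ((a : Int))) (some ((a : Int) + m))) 0).getD ' ']).getD 0 + j) 10)))) = true)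
      ↔ blockAt (stepsOf ascR (cs.map dval)) a (m.toNat - 1) := by
  have hcf := chunk_facts cs m (by omega) a haL
  set ds := cs.map dval with hds
  have hlds : ds.length = cs.length := by simp [hds]
  have hbds : ∀ k : Nat, k < cs.length → 0 ≤ ds.getD k 0 ∧ ds.getD k 0 < 10 := by
    intro k hk
    rw [getD_map_dval cs k hk]
    exact dval_bounds _ (hdigcs _ (by rw [List.getD_eq_getElem _ ' ' hk]; exact List.getElem_mem _))
  set chunk := PySem.List.slice cs (some ((a : Int))) (some ((a : Int) + m)) with hchunk
  obtain ⟨hslice, hclen'⟩ := hcf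
  have hclen : chunk.length = m.toNat := by rw [hslice]; exact hclen'
  have hcdig : ∀ c ∈ chunk, PySem.Chars.isdigit c = true := by
    intro c hc
    rw [hslice] at hc
    exact hdigcs c (List.mem_of_mem_drop (List.mem_of_mem_take hc))
  have hvals : ∀ j : Nat, j < m.toNat → dval (chunk.getD j ' ') = ds.getD (a + j) 0 := by
    intro j hj
    rw [hslice, getD_drop_take cs a m.toNat j ' ' hj (by omega), getD_map_dval cs (a + j) (by omega)]
  set X := (PySem.Int.ofChars? [(PySem.List.pyGet? chunk 0).getD ' ']).getD 0 with hXd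
  have hX : X = ds.getD a 0 := by
    rw [hXd, pyGet0_getD chunk (by omega)]
    rw [ofChars_digit _ (hcdig _ (by rw [List.getD_eq_getElem _ ' ' (by omega)]; exact List.getElem_mem _))]
    have := hvals 0 (by omega)
    simpa using this
  rw [beq_iff_eq, pattern_chars m (by omega) (fun j => X + j),
    chunk_eq_pattern_iff chunk m (fun j => X + j) hclen hcdig]
  have W := win_iff_chain ds (fun v hv => by
      obtain ⟨c, hc, rfl⟩ := List.mem_map.mp (hds ▸ hv)
      exact dval_bounds c (hdigcs c hc)) a m.toNat (by omega) (by omega) 1 (Or.inl rfl)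
  have step1 : (∀ j : Nat, j < m.toNat → dval (chunk.getD j ' ') = PySem.Int.mod (X + (j : Int)) 10)
      ↔ (∀ j : Nat, j < m.toNat → ds.getD (a + j) 0 = PySem.Int.mod (ds.getD a 0 + 1 * (j : Int)) 10) := by
    constructor <;> intro H j hj <;> have h' := H j hj
    · rw [hvals j hj, hX] at h'
      rw [h']
      ring_nf
    · rw [hvals j hj, hX]
      rw [h']
      ring_nf
  rw [step1, W]
  constructor
  · intro chain
    refine ⟨?_, ?_⟩
    · rw [stepsOf_length, hlds]; omega
    · intro j hj
      rw [stepsOf_getD ascR ds (a + j) (by omega)]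
      have hb1 := hbds (a + j) (by omega)
      have hb2 := hbds (a + j + 1) (by omega)
      rw [show ascR (ds.getD (a + j) 0) (ds.getD (a + j + 1) 0)
            = (PySem.Int.mod (1 * (ds.getD (a + j + 1) 0 - ds.getD (a + j) 0)) 10 == 1) from by rw [one_mul]; rfl]
      rw [show a + j + 1 = a + (j + 1) from by omega] at hb2
      exact (step_iff _ _ hb1 hb2 1 (Or.inl rfl)).mpr (by
        have := chain j (by omega)
        rw [show a + j + 1 = a + (j + 1) from by omega] at this
        exact this)
  · rintro ⟨hlen, hblk⟩ j hj
    have h' := hblk j (by omega)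
    rw [stepsOf_getD ascR ds (a + j) (by omega)] at h'
    have hb1 := hbds (a + j) (by omega)
    have hb2 := hbds (a + j + 1) (by omega)
    rw [show ascR (ds.getD (a + j) 0) (ds.getD (a + j + 1) 0)
          = (PySem.Int.mod (1 * (ds.getD (a + j + 1) 0 - ds.getD (a + j) 0)) 10 == 1) from by rw [one_mul]; rfl] at h'
    rw [show a + j + 1 = a + (j + 1) from by omega] at hb2
    have := (step_iff _ _ hb1 hb2 1 (Or.inl rfl)).mp h'
    rw [show a + j + 1 = a + (j + 1) from by omega]
    exact this

lemma descpat_iff (cs : List Char) (hdigcs : ∀ c ∈ cs, PySem.Chars.isdigit c = true)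
    (m : Int) (hm2 : 2 ≤ m) (a : Nat) (haL : a + m.toNat ≤ cs.length) :
    ((PySem.List.slice cs (some ((a : Int))) (some ((a : Int) + m)) ==
        PySem.Chars.join [] ((PySem.List.pyRange 0 m 1).map (fun j =>
          PySem.Int.toChars (PySem.Int.mod ((PySem.Int.ofChars? [(PySem.List.pyGet? (PySem.List.slice cs (some ((a : Int))) (some ((a : Int) + m))) 0).getD ' ']).getD 0 - j) 10)))) = true)
      ↔ blockAt (stepsOf descR (cs.map dval)) a (m.toNat - 1) := by
  have hcf := chunk_facts cs m (by omega) a haL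
  set ds := cs.map dval with hds
  have hlds : ds.length = cs.length := by simp [hds]
  have hbds : ∀ k : Nat, k < cs.length → 0 ≤ ds.getD k 0 ∧ ds.getD k 0 < 10 := by
    intro k hk
    rw [getD_map_dval cs k hk]
    exact dval_bounds _ (hdigcs _ (by rw [List.getD_eq_getElem _ ' ' hk]; exact List.getElem_mem _))
  set chunk := PySem.List.slice cs (some ((a : Int))) (some ((a : Int) + m)) with hchunk
  obtain ⟨hslice, hclen'⟩ := hcf
  have hclen : chunk.length = m.toNat := by rw [hslice]; exact hclen'
  have hcdig : ∀ c ∈ chunk, PySem.Chars.isdigit c = true := by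
    intro c hc
    rw [hslice] at hc
    exact hdigcs c (List.mem_of_mem_drop (List.mem_of_mem_take hc))
  have hvals : ∀ j : Nat, j < m.toNat → dval (chunk.getD j ' ') = ds.getD (a + j) 0 := by
    intro j hj
    rw [hslice, getD_drop_take cs a m.toNat j ' ' hj (by omega), getD_map_dval cs (a + j) (by omega)]
  set X := (PySem.Int.ofChars? [(PySem.List.pyGet? chunk 0).getD ' ']).getD 0 with hXd
  have hX : X = ds.getD a 0 := by
    rw [hXd, pyGet0_getD chunk (by omega)]
    rw [ofChars_digit _ (hcdig _ (by rw [List.getD_eq_getElem _ ' ' (by omega)]; exact List.getElem_mem _))]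
    have := hvals 0 (by omega)
    simpa using this
  rw [beq_iff_eq, pattern_chars m (by omega) (fun j => X - j),
    chunk_eq_pattern_iff chunk m (fun j => X - j) hclen hcdig]
  have W := win_iff_chain ds (fun v hv => by
      obtain ⟨c, hc, rfl⟩ := List.mem_map.mp (hds ▸ hv)
      exact dval_bounds c (hdigcs c hc)) a m.toNat (by omega) (by omega) (-1) (Or.inr rfl)
  have step1 : (∀ j : Nat, j < m.toNat → dval (chunk.getD j ' ') = PySem.Int.mod (X - (j : Int)) 10)
      ↔ (∀ j : Nat, j < m.toNat → ds.getD (a + j) 0 = PySem.Int.mod (ds.getD a 0 + (-1) * (j : Int)) 10) := by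
    constructor <;> intro H j hj <;> have h' := H j hj
    · rw [hvals j hj, hX] at h'
      rw [h']
      ring_nf
    · rw [hvals j hj, hX]
      rw [h']
      ring_nf
  rw [step1, W]
  constructor
  · intro chain
    refine ⟨?_, ?_⟩
    · rw [stepsOf_length, hlds]; omega
    · intro j hj
      rw [stepsOf_getD descR ds (a + j) (by omega)]
      have hb1 := hbds (a + j) (by omega)
      have hb2 := hbds (a + j + 1) (by omega)
      rw [show descR (ds.getD (a + j) 0) (ds.getD (a + j + 1) 0)
            = (PySem.Int.mod ((-1) * (ds.getD (a + j + 1) 0 - ds.getD (a + j) 0)) 10 == 1) from by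
          rw [show (-1 : Int) * (ds.getD (a + j + 1) 0 - ds.getD (a + j) 0)
                = ds.getD (a + j) 0 - ds.getD (a + j + 1) 0 from by ring]
          rfl]
      rw [show a + j + 1 = a + (j + 1) from by omega] at hb2
      exact (step_iff _ _ hb1 hb2 (-1) (Or.inr rfl)).mpr (by
        have := chain j (by omega)
        rw [show a + j + 1 = a + (j + 1) from by omega] at this
        exact this)
  · rintro ⟨hlen, hblk⟩ j hj
    have h' := hblk j (by omega)
    rw [stepsOf_getD descR ds (a + j) (by omega)] at h'
    have hb1 := hbds (a + j) (by omega)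
    have hb2 := hbds (a + j + 1) (by omega)
    rw [show descR (ds.getD (a + j) 0) (ds.getD (a + j + 1) 0)
          = (PySem.Int.mod ((-1) * (ds.getD (a + j + 1) 0 - ds.getD (a + j) 0)) 10 == 1) from by
        rw [show (-1 : Int) * (ds.getD (a + j + 1) 0 - ds.getD (a + j) 0)
              = ds.getD (a + j) 0 - ds.getD (a + j + 1) 0 from by ring]
        rfl] at h'
    rw [show a + j + 1 = a + (j + 1) from by omega] at hb2
    have := (step_iff _ _ hb1 hb2 (-1) (Or.inr rfl)).mp h'
    rw [show a + j + 1 = a + (j + 1) from by omega]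
    exact this

-- ===== VERDICT (by name: the statement is the Claim_ definition above) =====
theorem has_digit_sequence_py_spec : Claim_equal_has_digit_sequence_py := by
  intro password m _
  unfold Spec_has_digit_sequence_py
  simp only [has_digit_sequence_py, has_digit_sequence_py_alt]
  set cs : List Char := password.toList.filter (fun c => PySem.Chars.isdigit c) with hcs
  have hdigcs : ∀ c ∈ cs, PySem.Chars.isdigit c = true := fun c hc => (List.mem_filter.mp hc).2
  have hdsmap : cs.map (fun c => (PySem.Int.ofChars? [c]).getD 0) = cs.map dval :=
    List.map_congr_left (fun c hc => ofChars_digit c (hdigcs c hc))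
  rw [hdsmap]
  simp only [List.length_map, aLoop_eq_any, aChunkHit]
  by_cases hm2 : 2 ≤ m
  · rw [if_neg (show ¬ m ≤ 1 by omega)]
    by_cases hLm : (cs.length : Int) < m
    · rw [if_pos hLm, if_pos hLm]
    · rw [if_neg hLm, if_neg hLm]
      rw [altRun_eq, Bool.eq_iff_iff]
      simp only [Bool.or_eq_true]
      rw [reachB_one_iff m hm2, reachB_one_iff m hm2, List.any_eq_true]
      constructor
      · rintro ⟨i, hmem, hbody⟩
        rw [PySem.List.mem_pyRange_one] at hmem
        obtain ⟨hi0, hiu⟩ := hmem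
        have hia : i = ((i.toNat : Nat) : Int) := by omega
        set a := i.toNat with hadef
        have haL : a + m.toNat ≤ cs.length := by omega
        rw [hia] at hbody
        simp only [Bool.or_eq_true] at hbody
        rcases hbody with h | h
        · exact Or.inl ⟨a, (ascpat_iff cs hdigcs m hm2 a haL).mp h⟩
        · exact Or.inr ⟨a, (descpat_iff cs hdigcs m hm2 a haL).mp h⟩
      · rintro (⟨a, hblk⟩ | ⟨a, hblk⟩) <;>
          [(have haL : a + m.toNat ≤ cs.length := by
              have h1 := hblk.1
              rw [stepsOf_length] at h1
              simp only [List.length_map] at h1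
              omega);
           (have haL : a + m.toNat ≤ cs.length := by
              have h1 := hblk.1
              rw [stepsOf_length] at h1
              simp only [List.length_map] at h1
              omega)] <;>
          refine ⟨((a : Nat) : Int), by rw [PySem.List.mem_pyRange_one]; omega, ?_⟩ <;>
          simp only [Bool.or_eq_true]
        · exact Or.inl ((ascpat_iff cs hdigcs m hm2 a haL).mpr hblk)
        · exact Or.inr ((descpat_iff cs hdigcs m hm2 a haL).mpr hblk)
  · rw [if_pos (show m ≤ 1 by omega)]
    by_cases hm0 : m ≤ 0
    · have hL0 : (0 : Int) ≤ (cs.length : Int) := Int.natCast_nonneg _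
      rw [if_neg (show ¬ ((cs.length : Int) < m) by omega)]
      rw [show decide (m ≤ (cs.length : Int)) = true from by simp; omega]
      rw [List.any_eq_true]
      refine ⟨((cs.length : Nat) : Int), by rw [PySem.List.mem_pyRange_one]; omega, ?_⟩
      have hchunk : PySem.List.slice cs (some ((cs.length : Nat) : Int)) (some (((cs.length : Nat) : Int) + m)) = [] := by
        simp [PySem.List.slice, PySem.List.clampIdx]
        split_ifs <;> omega
      have hrange : PySem.List.pyRange 0 m 1 = [] := by
        simp [PySem.List.pyRange, show ¬ (0 : Int) < m from by omega]
      simp only [hchunk, hrange, List.map_nil]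
      rfl
    · have hm1 : m = 1 := by omega
      subst hm1
      by_cases hL0 : cs.length = 0
      · rw [if_pos (by simp [hL0])]
        rw [show decide ((1 : Int) ≤ (cs.length : Int)) = false from by simp [hL0]]
      · have hL1 : 1 ≤ cs.length := Nat.pos_of_ne_zero hL0
        rw [if_neg (by omega), show decide ((1 : Int) ≤ (cs.length : Int)) = true from by simp; omega]
        rw [List.any_eq_true]
        refine ⟨((0 : Nat) : Int), by rw [PySem.List.mem_pyRange_one]; omega, ?_⟩
        have hcf := chunk_facts cs 1 (by norm_num) 0 (by simpa using hL1)
        obtain ⟨hslice, hclen'⟩ := hcf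
        set chunk := PySem.List.slice cs (some ((0 : Nat) : Int)) (some (((0 : Nat) : Int) + 1)) with hchunkd
        have hclen : chunk.length = (1 : Int).toNat := by rw [hslice]; exact hclen'
        have hcdig : ∀ c ∈ chunk, PySem.Chars.isdigit c = true := by
          intro c hc
          rw [hslice] at hc
          exact hdigcs c (List.mem_of_mem_drop (List.mem_of_mem_take hc))
        set X := (PySem.Int.ofChars? [(PySem.List.pyGet? chunk 0).getD ' ']).getD 0 with hXd
        have hc0 : chunk.getD 0 ' ' ∈ chunk := by
          rw [List.getD_eq_getElem _ ' ' (by simp only [Int.toNat_one] at hclen; omega)]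
          exact List.getElem_mem _
        have hX : X = dval (chunk.getD 0 ' ') := by
          rw [hXd, pyGet0_getD chunk (by simp only [Int.toNat_one] at hclen; omega)]
          exact ofChars_digit _ (hcdig _ hc0)
        simp only [Bool.or_eq_true]
        refine Or.inl ?_
        rw [beq_iff_eq, pattern_chars 1 (by norm_num) (fun j => X + j),
          chunk_eq_pattern_iff chunk 1 (fun j => X + j) hclen hcdig]
        intro j hj
        have hj0 : j = 0 := by simp only [Int.toNat_one] at hj; omega
        subst hj0
        rw [hX]
        have hb := dval_bounds _ (hcdig _ hc0)
        rw [PySem.Int.mod_eq_emod_of_pos (by norm_num)]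
        omega
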